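-- pv_equiv track=rewrite | github.com/cobaltt7/python-exercises | 3 puzzles/66-68.py | sixtySix
-- ===== SOURCE A (Python) =====
-- def sixtySix(data):
--     """
--     Write a Python program to find the indices of the closest pair from a list of numbers.
--     """
--     closest = []
--     diff = None
--     for index2, second in enumerate(data):
--         for index1, first in enumerate(data[:index2]):
--             test = abs(second - first)
--             if diff is None or test < diff:
--                 diff = test
--                 closest = [index1, index2]
--     return closest
-- ===== SOURCE B (Python) =====
-- def sixtySix(data):
--     """
--     Write a Python program to find the indices of the closest pair from a list of numbers.
--     """
--     if len(data) < 2: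
--         return []
--     s = sorted(data)
--     d = min(b - a for a, b in zip(s, s[1:]))
--     first = {}
--     for j, v in enumerate(data):
--         cands = [first[w] for w in (v - d, v + d) if w in first]
--         if cands:
--             return [min(cands), j]
--         if v not in first:
--             first[v] = j
-- ===== Notes on version B (the rewrite author's own statement) =====
-- stated objective: faster
-- what changed: A scans all O(n^2) ordered pairs while tracking the running minimum; B sorts the list to read the minimum difference off adjacent gaps, then makes one pass with a value-to-first-index dict to return the first (smallest j, then smallest i) pair achieving it.
import Mathlib
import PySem

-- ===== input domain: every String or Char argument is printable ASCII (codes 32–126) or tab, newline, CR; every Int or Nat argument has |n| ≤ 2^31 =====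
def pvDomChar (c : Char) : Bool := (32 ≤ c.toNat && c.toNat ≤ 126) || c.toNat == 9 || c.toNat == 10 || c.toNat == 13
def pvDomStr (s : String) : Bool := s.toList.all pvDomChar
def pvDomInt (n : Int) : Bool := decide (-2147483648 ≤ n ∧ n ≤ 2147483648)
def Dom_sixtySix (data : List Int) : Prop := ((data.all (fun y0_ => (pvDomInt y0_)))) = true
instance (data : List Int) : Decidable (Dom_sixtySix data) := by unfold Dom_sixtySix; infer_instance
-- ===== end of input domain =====

-- B replaces A's quadratic scan over all pairs by: sort to get the minimum difference from adjacent
-- gaps, then one pass with a value→first-index dict to find the first pair achieving it (faster).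

-- ===== PORT A =====
def sixtySix (data : List Int) : List Int :=
  ((PySem.List.enumerate data 0).foldl
    (fun (st : List Int × Option Int) p =>
      (PySem.List.enumerate (PySem.List.slice data none (some p.1)) 0).foldl
        (fun st q =>
          match st.2 with
          | none => ([q.1, p.1], some |p.2 - q.2|)
          | some diff => if |p.2 - q.2| < diff then ([q.1, p.1], some |p.2 - q.2|) else st)
        st)
    ([], none)).1

-- ===== PORT B =====
def sixtySixLoop (d : Int) : List (Int × Int) → PySem.Dict Int Int → List Int
  | [], _ => []
  | (j, v) :: rest, first =>
    let cands := ([v - d, v + d]).filterMap (fun w => first.get? w)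
    match PySem.List.min? cands (fun x => x) with
    | some m => [m, j]
    | none => sixtySixLoop d rest (if first.contains v then first else first.insert v j)

def sixtySix_alt (data : List Int) : List Int :=
  if data.length < 2 then []
  else
    let s := PySem.List.sorted data (fun x => x) false
    match PySem.List.min? ((s.zip (PySem.List.slice s (some 1) none)).map (fun p => p.2 - p.1))
        (fun x => x) with
    | none => []
    | some d => sixtySixLoop d (PySem.List.enumerate data 0) PySem.Dict.empty

-- ===== PRECONDITION & SPEC =====
def Spec_sixtySix (data : List Int) (out : List Int) : Prop := out = sixtySix_alt data
instance (data : List Int) (out : List Int) : Decidable (Spec_sixtySix data out) := by unfold Spec_sixtySix; infer_instance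

-- ===== CLAIM (what is proved, stated in full; the proofs are below) =====
def Claim_equal_sixtySix : Prop := ∀ (data : List Int), Dom_sixtySix data → Spec_sixtySix data (sixtySix data)

-- ===== LEMMAS AND PROOFS =====

-- The generic arg-min step A's inner loop performs.
def amStep (st : List Int × Option Int) (pv : List Int × Int) : List Int × Option Int :=
  match st.2 with
  | none => (pv.1, some pv.2)
  | some diff => if pv.2 < diff then (pv.1, some pv.2) else st

def amFold (L : List (List Int × Int)) (st : List Int × Option Int) : List Int × Option Int :=
  L.foldl amStep st

-- The flattened list of (payload, value) triples A scans, block by outer index.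
def Tflat : List (Int × Int) → List (Int × Int) → List (List Int × Int)
  | _, [] => []
  | P, jv :: post =>
    P.map (fun q => ([q.1, jv.1], |jv.2 - q.2|)) ++ Tflat (P ++ [jv]) post

-- The common search spec: first outer j whose prefix holds a partner at distance d.
def sSpec (d : Int) : List (Int × Int) → List (Int × Int) → List Int
  | _, [] => []
  | P, jv :: post =>
    match (P.find? (fun q => |jv.2 - q.2| == d)).map (·.1) with
    | some i => [i, jv.1]
    | none => sSpec d (P ++ [jv]) post

def minO : Option Int → Option Int → Option Int
  | none, o => o
  | o, none => o
  | some a, some b => some (min a b)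

-- ---- small helpers on min? ----
theorem min?_eq_of (xs : List Int) (m : Int) (hm : m ∈ xs) (hlb : ∀ y ∈ xs, m ≤ y) :
    PySem.List.min? xs (fun x => x) = some m := by
  cases hx : PySem.List.min? xs (fun x => x) with
  | none => exact absurd ((PySem.List.min?_eq_none_iff xs _).mp hx ▸ hm) (List.not_mem_nil)
  | some m' =>
    have h1 := PySem.List.min?_mem hx
    have h2 := PySem.List.min?_isMin hx m hm
    have h3 := hlb m' h1
    simp only [Option.some.injEq]
    omega

-- ---- A side: fold characterisation ----
theorem amFold_const (L : List (List Int × Int)) (c : List Int) (m : Int)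
    (h : ∀ pv ∈ L, m ≤ pv.2) : amFold L (c, some m) = (c, some m) := by
  induction L with
  | nil => rfl
  | cons p L ih =>
    have hp := h p (List.mem_cons_self ..)
    have : amStep (c, some m) p = (c, some m) := by
      simp only [amStep]
      rw [if_neg (not_lt.mpr hp)]
    simpa only [amFold, List.foldl_cons, this] using ih (fun pv hpv => h pv (List.mem_cons_of_mem _ hpv))

theorem amFold_min (L : List (List Int × Int)) (c : List Int) (m w : Int) (pv0 : List Int × Int)
    (hw : PySem.List.min? (L.map (·.2)) (fun x => x) = some w) (hwm : w < m)
    (hfind : L.find? (fun pv => pv.2 == w) = some pv0) :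
    amFold L (c, some m) = (pv0.1, some w) := by
  induction L generalizing c m with
  | nil => simp at hfind
  | cons p L ih =>
    have hmem : w ∈ (p :: L).map (·.2) := PySem.List.min?_mem hw
    have hlb : ∀ y ∈ (p :: L).map (·.2), w ≤ y := PySem.List.min?_isMin hw
    by_cases hp : p.2 = w
    · -- find? fires at p
      have hfind' : pv0 = p := by
        simp only [List.find?_cons, show (p.2 == w) = true by simpa using hp] at hfind
        exact (Option.some.injEq ..).mp hfind |>.symm
      have hstep : amStep (c, some m) p = (p.1, some w) := by
        simp only [amStep]
        rw [if_pos (hp ▸ hwm), hp]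
      rw [hfind']
      simp only [amFold, List.foldl_cons, hstep]
      exact amFold_const L p.1 w (fun pv hpv =>
        hlb pv.2 (List.mem_map_of_mem (List.mem_cons_of_mem p hpv)))
    · -- find? recurses
      have hfind' : L.find? (fun pv => pv.2 == w) = some pv0 := by
        simpa only [List.find?_cons, show (p.2 == w) = false by simpa using hp] using hfind
      have hwL : w ∈ L.map (·.2) := by
        rcases List.mem_cons.mp hmem with h | h
        · exact absurd h.symm hp
        · exact h
      have hwmin : PySem.List.min? (L.map (·.2)) (fun x => x) = some w :=
        min?_eq_of _ _ hwL (fun y hy => hlb y (List.mem_cons_of_mem _ hy))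
      have hwp : w < p.2 := lt_of_le_of_ne (hlb p.2 (by simp)) (fun h => hp h.symm)
      by_cases hpm : p.2 < m
      · have hstep : amStep (c, some m) p = (p.1, some p.2) := by
          simp only [amStep]; rw [if_pos hpm]
        simp only [amFold, List.foldl_cons, hstep]
        exact ih p.1 p.2 hwmin hwp hfind'
      · have hstep : amStep (c, some m) p = (c, some m) := by
          simp only [amStep]; rw [if_neg hpm]
        simp only [amFold, List.foldl_cons, hstep]
        exact ih c m hwmin hwm hfind'

theorem amFold_none (L : List (List Int × Int)) (c : List Int) (w : Int) (pv0 : List Int × Int)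
    (hw : PySem.List.min? (L.map (·.2)) (fun x => x) = some w)
    (hfind : L.find? (fun pv => pv.2 == w) = some pv0) :
    amFold L (c, none) = (pv0.1, some w) := by
  cases L with
  | nil => simp at hfind
  | cons p L =>
    have hmem : w ∈ (p :: L).map (·.2) := PySem.List.min?_mem hw
    have hlb : ∀ y ∈ (p :: L).map (·.2), w ≤ y := PySem.List.min?_isMin hw
    have hstep : amStep (c, none) p = (p.1, some p.2) := rfl
    by_cases hp : p.2 = w
    · have hfind' : pv0 = p := by
        simp only [List.find?_cons, show (p.2 == w) = true by simpa using hp] at hfind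
        exact (Option.some.injEq ..).mp hfind |>.symm
      rw [hfind']
      simp only [amFold, List.foldl_cons, hstep, hp]
      exact amFold_const L p.1 w (fun pv hpv =>
        hlb pv.2 (List.mem_map_of_mem (List.mem_cons_of_mem p hpv)))
    · have hfind' : L.find? (fun pv => pv.2 == w) = some pv0 := by
        simpa only [List.find?_cons, show (p.2 == w) = false by simpa using hp] using hfind
      have hwL : w ∈ L.map (·.2) := by
        rcases List.mem_cons.mp hmem with h | h
        · exact absurd h.symm hp
        · exact h
      have hwmin : PySem.List.min? (L.map (·.2)) (fun x => x) = some w :=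
        min?_eq_of _ _ hwL (fun y hy => hlb y (List.mem_cons_of_mem _ hy))
      have hwp : w < p.2 := lt_of_le_of_ne (hlb p.2 (by simp)) (fun h => hp h.symm)
      simp only [amFold, List.foldl_cons, hstep]
      exact amFold_min L p.1 p.2 w pv0 hwmin hwp hfind'

theorem enumerate_take (xs : List Int) : ∀ (k : Nat) (s : Int),
    PySem.List.enumerate (xs.take k) s = (PySem.List.enumerate xs s).take k := by
  induction xs with
  | nil => intro k s; simp [PySem.List.enumerate_nil]
  | cons x xs ih =>
    intro k s
    cases k with
    | zero => simp [PySem.List.enumerate_cons]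
    | succ k => simp [PySem.List.enumerate_cons, List.take_succ_cons, ih k (s + 1)]

theorem foldl_blocks {α β σ : Type} (E : List α) (h : α → List β) (g : σ → β → σ) (st : σ) :
    E.foldl (fun st p => (h p).foldl g st) st = (E.flatMap h).foldl g st := by
  induction E generalizing st with
  | nil => rfl
  | cons p E ih => simp only [List.foldl_cons, List.flatMap_cons, List.foldl_append, ih]

theorem flat_eq_Tflat (data : List Int) : ∀ (m k : Nat),
    m = (PySem.List.enumerate data 0).length - k →
    ((PySem.List.enumerate data 0).drop k).flatMap
        (fun p => (((PySem.List.enumerate data 0).take p.1.toNat).map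
          (fun q => ([q.1, p.1], |p.2 - q.2|)))) =
      Tflat ((PySem.List.enumerate data 0).take k) ((PySem.List.enumerate data 0).drop k) := by
  intro m
  induction m with
  | zero =>
    intro k hk
    have : (PySem.List.enumerate data 0).length ≤ k := by omega
    rw [List.drop_eq_nil_of_le this]
    rfl
  | succ m ih =>
    intro k hk
    set E := PySem.List.enumerate data 0 with hE
    have hklt : k < E.length := by omega
    have hdrop : E.drop k = E[k] :: E.drop (k + 1) := (List.getElem_cons_drop hklt).symm
    have hfst : E[k].1 = (k : Int) := by
      simp [hE, PySem.List.getElem_enumerate]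
    have htake : E.take (k + 1) = E.take k ++ [E[k]] := by
      rw [List.take_add_one, List.getElem?_eq_getElem hklt]
      rfl
    rw [hdrop, List.flatMap_cons]
    simp only [Tflat]
    congr 1
    · rw [hfst]
      simp only [Int.toNat_natCast]
    · rw [← htake]
      exact ih (k + 1) (by omega)

-- A's nested folds = amFold over the flattened triples.
theorem sixtySix_eq_amFold (data : List Int) :
    sixtySix data = (amFold (Tflat [] (PySem.List.enumerate data 0)) ([], none)).1 := by
  unfold sixtySix
  congr 1
  rw [PySem.List.foldl_congr_mem _ _
    (fun st p => (((PySem.List.enumerate data 0).take p.1.toNat).map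
      (fun q => ([q.1, p.1], |p.2 - q.2|))).foldl amStep st) _ ?_]
  · rw [foldl_blocks]
    have h := flat_eq_Tflat data ((PySem.List.enumerate data 0).length - 0) 0 rfl
    simp only [List.drop_zero, List.take_zero] at h
    rw [h]
    rfl
  · intro st p hp
    obtain ⟨k, hk, rfl⟩ := (PySem.List.mem_enumerate_iff _ _ _).mp hp
    have h0 : (0 : Int) ≤ 0 + (k : Int) := by omega
    rw [PySem.List.slice_to _ h0, enumerate_take]
    simp only [List.foldl_map]
    rfl

-- find? over the flattened triples = the common search spec.
theorem sSpec_eq_find (d : Int) (post P : List (Int × Int)) :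
    sSpec d P post =
      match (Tflat P post).find? (fun pv => pv.2 == d) with
      | some pv => pv.1
      | none => [] := by
  induction post generalizing P with
  | nil => rfl
  | cons jv post ih =>
    simp only [Tflat, sSpec, List.find?_append, List.find?_map]
    have hcomp : P.find? ((fun pv => pv.2 == d) ∘ fun q => (([q.1, jv.1], |jv.2 - q.2|) : List Int × Int))
        = P.find? (fun q => |jv.2 - q.2| == d) := rfl
    rw [hcomp]
    cases hfp : P.find? (fun q => |jv.2 - q.2| == d) with
    | some q => rfl
    | none => simpa using ih (P ++ [jv])

-- ---- B side ----
theorem min?_two (g : Int → Option Int) (a b : Int) :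
    PySem.List.min? (([a, b]).filterMap g) (fun x => x) = minO (g a) (g b) := by
  cases ha : g a with
  | none =>
    cases hb : g b with
    | none =>
      simp only [List.filterMap_cons, ha, hb, List.filterMap_nil, minO]
      exact (PySem.List.min?_eq_none_iff _ _).mpr rfl
    | some y =>
      simp only [List.filterMap_cons, ha, hb, List.filterMap_nil, minO]
      simpa using PySem.List.min?_id_cons y []
  | some x =>
    cases hb : g b with
    | none =>
      simp only [List.filterMap_cons, ha, hb, List.filterMap_nil, minO]
      simpa using PySem.List.min?_id_cons x []
    | some y =>
      simp only [List.filterMap_cons, ha, hb, List.filterMap_nil, minO]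
      simpa using PySem.List.min?_id_cons x [y]

theorem find_two (d v : Int) (hd : 0 ≤ d) (P : List (Int × Int))
    (hmono : P.Pairwise (fun a b => a.1 < b.1)) :
    minO ((P.find? (fun q => q.2 == v - d)).map (·.1))
         ((P.find? (fun q => q.2 == v + d)).map (·.1))
      = (P.find? (fun q => |v - q.2| == d)).map (·.1) := by
  induction P with
  | nil => rfl
  | cons q P ih =>
    rcases List.pairwise_cons.mp hmono with ⟨hq, hP⟩
    have habs : (|v - q.2| = d) ↔ (q.2 = v - d ∨ q.2 = v + d) := by
      rw [abs_eq hd]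
      omega
    by_cases h1 : q.2 = v - d
    · have hr : (|v - q.2| == d) = true := by
        simp only [beq_iff_eq]
        exact habs.mpr (Or.inl h1)
      by_cases h2 : q.2 = v + d
      · simp only [List.find?_cons, show (q.2 == v - d) = true by simpa using h1,
          show (q.2 == v + d) = true by simpa using h2, hr, Option.map_some, minO]
        simp
      · simp only [List.find?_cons, show (q.2 == v - d) = true by simpa using h1,
          show (q.2 == v + d) = false by simpa using h2, hr, Option.map_some]
        cases hf : P.find? (fun r => r.2 == v + d) with
        | none => rfl
        | some r =>
          have hqr : q.1 < r.1 := hq r (List.mem_of_find?_eq_some hf)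
          simp only [Option.map_some, minO, Option.some.injEq]
          omega
    · by_cases h2 : q.2 = v + d
      · have hr : (|v - q.2| == d) = true := by
          simp only [beq_iff_eq]
          exact habs.mpr (Or.inr h2)
        simp only [List.find?_cons, show (q.2 == v - d) = false by simpa using h1,
          show (q.2 == v + d) = true by simpa using h2, hr, Option.map_some]
        cases hf : P.find? (fun r => r.2 == v - d) with
        | none => rfl
        | some r =>
          have hqr : q.1 < r.1 := hq r (List.mem_of_find?_eq_some hf)
          simp only [Option.map_some, minO, Option.some.injEq]
          omega
      · have hr : (|v - q.2| == d) = false := by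
          simp only [beq_eq_false_iff_ne, ne_eq]
          rw [habs]
          tauto
        simp only [List.find?_cons, show (q.2 == v - d) = false by simpa using h1,
          show (q.2 == v + d) = false by simpa using h2, hr]
        exact ih hP

theorem dict_update (P : List (Int × Int)) (first : PySem.Dict Int Int) (j v : Int)
    (hf : ∀ w, first.get? w = (P.find? (fun q => q.2 == w)).map (·.1)) (w : Int) :
    (if first.contains v then first else first.insert v j).get? w
      = ((P ++ [(j, v)]).find? (fun q => q.2 == w)).map (·.1) := by
  rw [List.find?_append]
  by_cases hc : first.contains v = true
  · rw [if_pos hc]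
    cases hP : P.find? (fun q => q.2 == w) with
    | some r => rw [Option.some_or, hf w, hP]
    | none =>
      have hwv : w ≠ v := by
        intro h
        subst h
        have := hf w
        rw [hP] at this
        rw [PySem.Dict.contains_eq_isSome_get?, this] at hc
        simp at this hc
      simp only [Option.none_or, hf w, hP, Option.map_none, List.find?_cons,
        show ((j, v).2 == w) = false by simpa using (Ne.symm hwv), List.find?_nil]
  · rw [if_neg hc]
    by_cases hwv : w = v
    · subst hwv
      have hnone : P.find? (fun q => q.2 == w) = none := by
        have := hf w
        rw [PySem.Dict.contains_eq_isSome_get?, this] at hc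
        cases h : P.find? (fun q => q.2 == w) with
        | none => rfl
        | some r => rw [h] at hc; simp at hc
      rw [PySem.Dict.get?_insert, if_pos rfl, hnone]
      simp
    · rw [PySem.Dict.get?_insert, if_neg hwv, hf w]
      have : ([(j, v)].find? (fun q => q.2 == w)) = none := by
        rw [List.find?_cons, show ((j, v).2 == w) = false by simpa using (Ne.symm hwv)]
        rfl
      rw [this, Option.or_none]

theorem loopB (d : Int) (hd : 0 ≤ d) (post P : List (Int × Int)) (first : PySem.Dict Int Int)
    (hf : ∀ w, first.get? w = (P.find? (fun q => q.2 == w)).map (·.1))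
    (hmono : (P ++ post).Pairwise (fun a b => a.1 < b.1)) :
    sixtySixLoop d post first = sSpec d P post := by
  induction post generalizing P first with
  | nil => rfl
  | cons jv post ih =>
    obtain ⟨j, v⟩ := jv
    have hPmono : P.Pairwise (fun a b => a.1 < b.1) := (List.pairwise_append.mp hmono).1
    have hq : PySem.List.min? (([v - d, v + d]).filterMap first.get?) (fun x => x)
        = (P.find? (fun q => |v - q.2| == d)).map (·.1) := by
      rw [min?_two, hf (v - d), hf (v + d), find_two d v hd P hPmono]
    simp only [sixtySixLoop, sSpec, hq]
    cases hfp : (P.find? (fun q => |v - q.2| == d)).map (·.1) with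
    | some i => rfl
    | none =>
      apply ih
      · exact fun w => dict_update P first j v hf w
      · have : (P ++ [(j, v)]) ++ post = P ++ ((j, v) :: post) := by simp
        rw [this]
        exact hmono

-- ---- the sorted-gap minimum equals the pairwise minimum ----
theorem two_le_count_of_getElem (l : List Int) (p q : Nat) (hq : q < l.length) (hlt : p < q)
    (h : l[p]'(by omega) = l[q]) : 2 ≤ l.count (l[q]) := by
  have hp : p < l.length := by omega
  have h1 : l[q] ∈ l.take (p + 1) := by
    rw [List.mem_take_iff_getElem]
    exact ⟨p, by omega, h⟩
  have h2 : l[q] ∈ l.drop (p + 1) := by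
    rw [List.mem_iff_getElem]
    refine ⟨q - (p + 1), by simp; omega, ?_⟩
    rw [List.getElem_drop]
    congr 1
    omega
  have key : l.count (l[q]) = (l.take (p + 1)).count (l[q]) + (l.drop (p + 1)).count (l[q]) := by
    conv_lhs => rw [show l.count l[q] = ((l.take (p+1)) ++ (l.drop (p+1))).count (l[q]) by
      rw [List.take_append_drop]]
    rw [List.count_append]
  rw [key]
  have c1 := List.count_pos_iff.mpr h1
  have c2 := List.count_pos_iff.mpr h2
  omega

theorem exists_two_getElem_of_two_le_count (l : List Int) (v : Int) (h : 2 ≤ l.count v) :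
    ∃ p q : Nat, ∃ hp : p < l.length, ∃ hq : q < l.length, p < q ∧ l[p] = v ∧ l[q] = v := by
  induction l with
  | nil => simp at h
  | cons a l ih =>
    by_cases hav : a = v
    · have h1 : 0 < l.count v := by
        rw [List.count_cons, if_pos (show (a == v) = true by simpa using hav)] at h
        omega
      obtain ⟨i, hi, hvi⟩ := List.mem_iff_getElem.mp (List.count_pos_iff.mp h1)
      exact ⟨0, i + 1, by simp, by simp; omega, by omega, by simpa using hav, by simpa using hvi⟩
    · have h1 : 2 ≤ l.count v := by
        rw [List.count_cons, if_neg (show ¬((a == v) = true) by simpa using hav)] at h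
        omega
      obtain ⟨p, q, hp, hq, hpq, hvp, hvq⟩ := ih h1
      exact ⟨p + 1, q + 1, by simp; omega, by simp; omega, by omega,
        by simpa using hvp, by simpa using hvq⟩

theorem mem_Tvals (data : List Int) (z : Int) :
    z ∈ (Tflat [] (PySem.List.enumerate data 0)).map (·.2) ↔
      ∃ i j : Nat, ∃ hi : i < data.length, ∃ hj : j < data.length, i < j ∧ z = |data[j] - data[i]| := by
  have hT : Tflat [] (PySem.List.enumerate data 0)
      = (PySem.List.enumerate data 0).flatMap
        (fun p => (((PySem.List.enumerate data 0).take p.1.toNat).map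
          (fun q => ([q.1, p.1], |p.2 - q.2|)))) := by
    have h := flat_eq_Tflat data ((PySem.List.enumerate data 0).length - 0) 0 rfl
    simp only [List.drop_zero, List.take_zero] at h
    rw [h]
  rw [hT]
  have hlenE : (PySem.List.enumerate data 0).length = data.length := by
    simp [PySem.List.length_enumerate]
  constructor
  · intro hz
    obtain ⟨pv, hpv, hval⟩ := List.mem_map.mp hz
    obtain ⟨p, hp, hpv2⟩ := List.mem_flatMap.mp hpv
    obtain ⟨q, hq, rfl⟩ := List.mem_map.mp hpv2
    obtain ⟨j, hj, rfl⟩ := (PySem.List.mem_enumerate_iff _ _ _).mp hp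
    obtain ⟨i, hi, hqE⟩ := List.mem_take_iff_getElem.mp hq
    have hiE : i < (PySem.List.enumerate data 0).length := by omega
    rw [PySem.List.getElem_enumerate data 0 i hiE] at hqE
    have hij : i < (0 + (j : Int)).toNat := by omega
    refine ⟨i, j, by omega, hj, by omega, ?_⟩
    rw [← hval, ← hqE]
  · rintro ⟨i, j, hi, hj, hij, rfl⟩
    refine List.mem_map.mpr ⟨([(0 + (i : Int)), (0 + (j : Int))], |data[j] - data[i]|), ?_, rfl⟩
    have hjE : j < (PySem.List.enumerate data 0).length := by omega
    have hiE : i < (PySem.List.enumerate data 0).length := by omega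
    refine List.mem_flatMap.mpr ⟨(PySem.List.enumerate data 0)[j], List.getElem_mem hjE, ?_⟩
    rw [PySem.List.getElem_enumerate data 0 j hjE]
    refine List.mem_map.mpr ⟨(0 + (i : Int), data[i]), ?_, by simp⟩
    refine List.mem_take_iff_getElem.mpr ⟨i, ?_, ?_⟩
    · simp
      omega
    · rw [PySem.List.getElem_enumerate data 0 i hiE]

theorem min_gaps_eq (data : List Int) (h2 : 2 ≤ data.length) :
    PySem.List.min?
      (((PySem.List.sorted data (fun x => x) false).zip
          ((PySem.List.sorted data (fun x => x) false).drop 1)).map (fun p => p.2 - p.1))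
      (fun x => x)
      = PySem.List.min? ((Tflat [] (PySem.List.enumerate data 0)).map (·.2)) (fun x => x) := by
  set s := PySem.List.sorted data (fun x => x) false with hs
  set gaps := (s.zip (s.drop 1)).map (fun p => p.2 - p.1) with hgaps
  set Tv := (Tflat [] (PySem.List.enumerate data 0)).map (·.2) with hTv
  have lens : s.length = data.length := by
    rw [hs, PySem.List.length_sorted]
  have hperm : s.Perm data := PySem.List.sorted_perm data _ false
  have hlen_gaps : gaps.length = s.length - 1 := by
    simp [hgaps]
  have hget_gaps : ∀ k (hk : k + 1 < s.length), s[k + 1] - s[k] ∈ gaps := by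
    intro k hk
    refine List.mem_iff_getElem.mpr ⟨k, by omega, ?_⟩
    simp only [hgaps, List.getElem_map, List.getElem_zip, List.getElem_drop]
    congr 2
    omega
  -- every gap is a pairwise difference
  have t1 : ∀ z ∈ gaps, z ∈ Tv := by
    intro z hz
    obtain ⟨k, hk, hzk⟩ := List.mem_iff_getElem.mp hz
    have hk1 : k + 1 < s.length := by omega
    have hzval : z = s[k + 1] - s[k] := by
      rw [← hzk]
      simp only [hgaps, List.getElem_map, List.getElem_zip, List.getElem_drop]
      congr 2
      omega
    have hle : s[k] ≤ s[k + 1] :=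
      PySem.List.sorted_id_getElem_mono data (by omega) hk1
    by_cases heq : s[k]'(by omega) = s[k + 1]
    · have hcnt : 2 ≤ data.count (s[k + 1]) := by
        rw [← hperm.count_eq]
        exact two_le_count_of_getElem s k (k + 1) hk1 (by omega) heq
      obtain ⟨p, q, hp, hq, hpq, hvp, hvq⟩ := exists_two_getElem_of_two_le_count data _ hcnt
      refine (mem_Tvals data z).mpr ⟨p, q, hp, hq, hpq, ?_⟩
      rw [hvp, hvq, hzval, heq]
      simp
    · have hm1 : s[k]'(by omega) ∈ data := hperm.mem_iff.mp (List.getElem_mem (by omega))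
      have hm2 : s[k + 1] ∈ data := hperm.mem_iff.mp (List.getElem_mem hk1)
      obtain ⟨i, hi, hdi⟩ := List.mem_iff_getElem.mp hm1
      obtain ⟨j, hj, hdj⟩ := List.mem_iff_getElem.mp hm2
      have hij : i ≠ j := by
        intro h
        subst h
        exact heq (hdi.symm.trans hdj)
      rcases Nat.lt_or_ge i j with h | h
      · refine (mem_Tvals data z).mpr ⟨i, j, hi, hj, h, ?_⟩
        rw [hdi, hdj, hzval, abs_of_nonneg (by omega)]
      · refine (mem_Tvals data z).mpr ⟨j, i, hj, hi, by omega, ?_⟩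
        rw [hdi, hdj, hzval, abs_of_nonpos (by omega)]
        omega
  -- every pairwise difference dominates some gap
  have t2 : ∀ z ∈ Tv, ∃ g ∈ gaps, g ≤ z := by
    intro z hz
    obtain ⟨i, j, hi, hj, hij, hzv⟩ := (mem_Tvals data z).mp hz
    by_cases heq : data[i]'(by omega) = data[j]
    · have hcnt : 2 ≤ s.count (data[j]) := by
        rw [hperm.count_eq]
        exact two_le_count_of_getElem data i j hj hij heq
      obtain ⟨p, q, hp, hq, hpq, hvp, hvq⟩ := exists_two_getElem_of_two_le_count s _ hcnt
      have hple : s[p + 1]'(by omega) ≤ s[q] :=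
        PySem.List.sorted_id_getElem_mono data (by omega) hq
      refine ⟨s[p + 1]'(by omega) - s[p], hget_gaps p (by omega), ?_⟩
      rw [hzv, heq]
      simp only [sub_self, abs_zero]
      omega
    · have hm1 : data[i]'(by omega) ∈ s := hperm.mem_iff.mpr (List.getElem_mem (by omega))
      have hm2 : data[j] ∈ s := hperm.mem_iff.mpr (List.getElem_mem hj)
      obtain ⟨p, hp, hdp⟩ := List.mem_iff_getElem.mp hm1
      obtain ⟨q, hq, hdq⟩ := List.mem_iff_getElem.mp hm2
      have hpq : p ≠ q := by
        intro h
        subst h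
        exact heq (hdp.symm.trans hdq)
      rcases Nat.lt_or_ge p q with h | h
      · have hple : s[p + 1]'(by omega) ≤ s[q] :=
          PySem.List.sorted_id_getElem_mono data (by omega) hq
        have hle : s[p] ≤ s[q] := PySem.List.sorted_id_getElem_mono data (by omega) hq
        refine ⟨s[p + 1]'(by omega) - s[p], hget_gaps p (by omega), ?_⟩
        rw [hzv, ← hdp, ← hdq, abs_of_nonneg (by omega)]
        omega
      · have hqlt : q < p := by omega
        have hple : s[q + 1]'(by omega) ≤ s[p] :=
          PySem.List.sorted_id_getElem_mono data (by omega) hp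
        have hle : s[q] ≤ s[p] := PySem.List.sorted_id_getElem_mono data (by omega) hp
        refine ⟨s[q + 1]'(by omega) - s[q], hget_gaps q (by omega), ?_⟩
        rw [hzv, ← hdp, ← hdq, abs_of_nonpos (by omega)]
        omega
  -- both minima exist and bound each other
  have hg01 : s[1]'(by omega) - s[0]'(by omega) ∈ gaps := hget_gaps 0 (by omega)
  cases hwg : PySem.List.min? gaps (fun x => x) with
  | none =>
    rw [(PySem.List.min?_eq_none_iff _ _).mp hwg] at hg01
    exact absurd hg01 (List.not_mem_nil)
  | some wg =>
  cases hwt : PySem.List.min? Tv (fun x => x) with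
  | none =>
    have := t1 _ (PySem.List.min?_mem hwg)
    rw [(PySem.List.min?_eq_none_iff _ _).mp hwt] at this
    exact absurd this (List.not_mem_nil)
  | some wt =>
  have h1 : wt ≤ wg := PySem.List.min?_isMin hwt _ (t1 _ (PySem.List.min?_mem hwg))
  obtain ⟨g, hg, hgle⟩ := t2 _ (PySem.List.min?_mem hwt)
  have h2 : wg ≤ wt := le_trans (PySem.List.min?_isMin hwg _ hg) hgle
  rw [Option.some.injEq]
  omega

-- ===== VERDICT (by name: the statement is the Claim_ definition above) =====
theorem sixtySix_spec : Claim_equal_sixtySix := by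
  intro data _
  unfold Spec_sixtySix sixtySix_alt
  by_cases hlen : data.length < 2
  · rw [if_pos hlen]
    match data, hlen with
    | [], _ => rfl
    | [x], _ => rfl
  · rw [if_neg hlen]
    have h2 : 2 ≤ data.length := by omega
    -- the pairwise minimum exists
    have hmem01 : |data[1]'(by omega) - data[0]'(by omega)|
        ∈ (Tflat [] (PySem.List.enumerate data 0)).map (·.2) :=
      (mem_Tvals data _).mpr ⟨0, 1, by omega, by omega, by omega, rfl⟩
    cases hw : PySem.List.min? ((Tflat [] (PySem.List.enumerate data 0)).map (·.2)) (fun x => x) with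
    | none =>
      rw [(PySem.List.min?_eq_none_iff _ _).mp hw] at hmem01
      exact absurd hmem01 (List.not_mem_nil)
    | some w =>
    have hwmem := PySem.List.min?_mem hw
    have hd : 0 ≤ w := by
      obtain ⟨i, j, hi, hj, hij, hz⟩ := (mem_Tvals data w).mp hwmem
      rw [hz]
      exact abs_nonneg _
    obtain ⟨pv, hpvmem, hpvw⟩ := List.mem_map.mp hwmem
    have hfindSome : ((Tflat [] (PySem.List.enumerate data 0)).find?
        (fun pv => pv.2 == w)).isSome = true :=
      List.find?_isSome.mpr ⟨pv, hpvmem, by simpa using hpvw⟩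
    cases hfind : (Tflat [] (PySem.List.enumerate data 0)).find? (fun pv => pv.2 == w) with
    | none => rw [hfind] at hfindSome; simp at hfindSome
    | some pv0 =>
    -- A's value
    have hA : sixtySix data = pv0.1 := by
      rw [sixtySix_eq_amFold, amFold_none _ _ w pv0 hw hfind]
    -- the gap minimum is the same w
    have hgap : PySem.List.min?
        (((PySem.List.sorted data (fun x => x) false).zip
          (PySem.List.slice (PySem.List.sorted data (fun x => x) false) (some 1) none)).map
          (fun p => p.2 - p.1)) (fun x => x) = some w := by
      rw [PySem.List.slice_from_one, show (PySem.List.sorted data (fun x => x) false).tail = (PySem.List.sorted data (fun x => x) false).drop 1 from List.drop_one.symm, min_gaps_eq data h2, hw]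
    simp only []
    rw [hgap]
    -- B's loop follows the common search spec, and so does A's result
    show sixtySix data = sixtySixLoop w (PySem.List.enumerate data 0) PySem.Dict.empty
    rw [loopB w hd (PySem.List.enumerate data 0) [] PySem.Dict.empty
      (fun w' => by rw [PySem.Dict.get?_empty]; rfl)
      (by simpa using PySem.List.pairwise_lt_enumerate data 0)]
    rw [sSpec_eq_find w (PySem.List.enumerate data 0) [], hfind, hA]
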